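-- pv_equiv track=rewrite | github.com/Rushijaviya/LeetCode-Contest | Biweekly Contest/Biweekly Contest 85/2_Time Needed to Rearrange a Binary String.py | secondsToRemoveOccurrences
-- ===== SOURCE A (Python) =====
-- def secondsToRemoveOccurrences(s: str) -> int:
--     '''
--     n=len(s)
--     time=0
--     s=list(s)
--     while True:
--         flag=0
--         idx=0
--         while idx<n-1:
--             if s[idx]=='0' and s[idx+1]=='1':
--                 s[idx],s[idx+1]=s[idx+1],s[idx]
--                 idx+=1
--                 flag=1
--             idx+=1
--         if not flag:
--             return time
--         time+=1
--     '''
--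
--     '''
--     ans=0
--     while '01' in s:
--         s=s.replace('01','10')
--         ans+=1
--     return ans
--     '''
--
--     zeros=0
--     seconds=0
--     for i in s:
--         if i=='0':
--             zeros+=1
--         if i=='1' and zeros:
--             seconds=max(seconds+1,zeros)
--     return seconds
-- ===== SOURCE B (Python) =====
-- def secondsToRemoveOccurrences(s: str) -> int:
--     # collect, for each '1' that has at least one '0' before it, the number of zeros before it;
--     # then answer in closed form: max over those ones of (zeros_before + ones_after_it_that_are_also_blocked)
--     waits = []
--     zeros = 0
--     for c in s:
--         if c == '0':
--             zeros += 1
--         elif c == '1' and zeros: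
--             waits.append(zeros)
--     return max((w + i for i, w in enumerate(reversed(waits))), default=0)
-- ===== Notes on version B (the rewrite author's own statement) =====
-- stated objective: alternative
-- what changed: B replaces the online DP recurrence seconds=max(seconds+1,zeros) with a collect-then-closed-form computation: it gathers the zero-count of every blocked one-digit into a list and returns the maximum of w+i over that list enumerated in reverse.
import Mathlib
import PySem

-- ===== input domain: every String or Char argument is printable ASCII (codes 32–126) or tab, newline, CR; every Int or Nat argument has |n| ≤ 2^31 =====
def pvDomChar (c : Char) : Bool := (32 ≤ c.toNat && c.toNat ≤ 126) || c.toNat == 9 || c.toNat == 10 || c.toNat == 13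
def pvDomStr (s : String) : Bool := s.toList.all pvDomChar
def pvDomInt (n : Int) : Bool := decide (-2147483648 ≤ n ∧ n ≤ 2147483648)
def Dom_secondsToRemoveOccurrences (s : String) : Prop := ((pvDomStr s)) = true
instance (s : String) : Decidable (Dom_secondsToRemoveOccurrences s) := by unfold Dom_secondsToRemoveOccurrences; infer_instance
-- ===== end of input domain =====

-- B computes the same answer by collecting the zero-count of each blocked one-digit and taking a
-- closed-form maximum over that list, instead of A's online max recurrence (objective: alternative).

-- ===== PORT A =====
def secondsToRemoveOccurrences (s : String) : Int :=
  (s.toList.foldl (fun (st : Int × Int) i =>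
      let zeros := if i = '0' then st.1 + 1 else st.1
      let seconds := if i = '1' ∧ zeros ≠ 0 then max (st.2 + 1) zeros else st.2
      (zeros, seconds)) (0, 0)).2

-- ===== PORT B =====
def secondsToRemoveOccurrences_alt (s : String) : Int :=
  -- waits = the loop's second component; result = max((w + i for i, w in enumerate(reversed(waits))), default=0)
  PySem.List.maxD
    (List.map (fun iw => iw.2 + iw.1)
      (PySem.List.enumerate
        (List.reverse
          (s.toList.foldl (fun (st : Int × List Int) c =>
            if c = '0' then (st.1 + 1, st.2)
            else if c = '1' ∧ st.1 ≠ 0 then (st.1, st.2 ++ [st.1])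
            else st) ((0 : Int), ([] : List Int))).2)))
    (fun x => x) 0

-- ===== PRECONDITION & SPEC =====
def Spec_secondsToRemoveOccurrences (s : String) (out : Int) : Prop := out = secondsToRemoveOccurrences_alt s
instance (s : String) (out : Int) : Decidable (Spec_secondsToRemoveOccurrences s out) := by unfold Spec_secondsToRemoveOccurrences; infer_instance

-- ===== CLAIM (what is proved, stated in full; the proofs are below) =====
def Claim_equal_secondsToRemoveOccurrences : Prop := ∀ (s : String), Dom_secondsToRemoveOccurrences s → Spec_secondsToRemoveOccurrences s (secondsToRemoveOccurrences s)

-- ===== LEMMAS AND PROOFS =====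

-- the list of zeros-before-it counts of every one-digit preceded by at least one zero, starting from z zeros
def eligL (z : Int) : List Char → List Int
  | [] => []
  | c :: t =>
      if c = '0' then eligL (z + 1) t
      else if c = '1' ∧ z ≠ 0 then z :: eligL z t
      else eligL z t

theorem eligL_pos : ∀ (l : List Char) (z : Int), 0 ≤ z → ∀ e ∈ eligL z l, 1 ≤ e := by
  intro l
  induction l with
  | nil => intro z _ e he; simp [eligL] at he
  | cons c t ih =>
    intro z hz e he
    by_cases h0 : c = '0'
    · exact ih (z + 1) (by omega) e (by simpa [eligL, h0] using he)
    · by_cases h1 : c = '1' ∧ z ≠ 0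
      · simp [eligL, h1] at he
        rcases he with he | he
        · omega
        · exact ih z hz e he
      · exact ih z hz e (by simpa [eligL, h0, h1] using he)

theorem A_fold : ∀ (l : List Char) (z sec : Int),
    (l.foldl (fun (st : Int × Int) i =>
      let zeros := if i = '0' then st.1 + 1 else st.1
      let seconds := if i = '1' ∧ zeros ≠ 0 then max (st.2 + 1) zeros else st.2
      (zeros, seconds)) (z, sec)).2
      = (eligL z l).foldl (fun s e => max (s + 1) e) sec := by
  intro l
  induction l with
  | nil => intro z sec; simp [eligL]
  | cons c t ih =>
    intro z sec
    by_cases h0 : c = '0'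
    · simp [eligL, h0, ih]
    · by_cases h1 : c = '1' ∧ z ≠ 0
      · simp [eligL, h1, ih]
      · simp only [List.foldl_cons, eligL, h0, h1]
        simp only [if_neg h1, ite_false]
        exact ih z sec

theorem B_fold : ∀ (l : List Char) (z : Int) (acc : List Int),
    (l.foldl (fun (st : Int × List Int) c =>
      if c = '0' then (st.1 + 1, st.2)
      else if c = '1' ∧ st.1 ≠ 0 then (st.1, st.2 ++ [st.1])
      else st) (z, acc)).2 = acc ++ eligL z l := by
  intro l
  induction l with
  | nil => intro z acc; simp [eligL]
  | cons c t ih =>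
    intro z acc
    by_cases h0 : c = '0'
    · simp [eligL, h0, ih]
    · by_cases h1 : c = '1' ∧ z ≠ 0
      · simp [eligL, h1, ih]
      · simp [eligL, h0, h1, ih]

theorem foldl_max_max : ∀ (l : List Int) (a b : Int),
    l.foldl max (max a b) = max a (l.foldl max b) := by
  intro l
  induction l with
  | nil => intro a b; simp
  | cons x t ih => intro a b; simp only [List.foldl_cons, max_assoc, ih]

theorem foldl_max_map_add_one : ∀ (l : List Int) (a : Int),
    (l.map (· + 1)).foldl max (a + 1) = l.foldl max a + 1 := by
  intro l
  induction l with
  | nil => intro a; simp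
  | cons x t ih =>
    intro a
    simp only [List.map_cons, List.foldl_cons]
    rw [show max (a + 1) (x + 1) = max a x + 1 by omega, ih]

theorem enum_shift : ∀ (t : List Int) (s : Int),
    (PySem.List.enumerate t s).map (fun iw => iw.2 + iw.1)
      = ((PySem.List.enumerate t 0).map (fun iw => iw.2 + iw.1)).map (fun a => a + s) := by
  intro t
  induction t with
  | nil => intro s; simp [PySem.List.enumerate_nil]
  | cons x t ih =>
    intro s
    rw [PySem.List.enumerate_cons, PySem.List.enumerate_cons]
    simp only [List.map_cons]
    congr 1
    · omega
    · rw [ih (s + 1), ih (0 + 1)]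
      simp only [List.map_map]
      apply List.map_congr_left
      intro a _
      simp only [Function.comp_apply]
      omega

theorem maxRev : ∀ (rs : List Int), (∀ e ∈ rs, 1 ≤ e) →
    rs.foldr (fun e s => max (s + 1) e) 0
      = PySem.List.maxD ((PySem.List.enumerate rs).map (fun iw => iw.2 + iw.1)) (fun x => x) 0 := by
  intro rs
  induction rs with
  | nil => intro _; simp [PySem.List.enumerate_nil, PySem.List.maxD, PySem.List.max?]
  | cons e t ih =>
    intro hpos
    have he : 1 ≤ e := hpos e (by simp)
    have ht : ∀ x ∈ t, 1 ≤ x := fun x hx => hpos x (by simp [hx])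
    rw [List.foldr_cons, ih ht]
    rw [PySem.List.enumerate_cons, List.map_cons]
    rw [show (0 : Int) + 1 = 1 by rfl, enum_shift t 1]
    cases hvt : (PySem.List.enumerate t 0).map (fun iw => iw.2 + iw.1) with
    | nil =>
      have hnone : (PySem.List.max? ([] : List Int) (fun x => x)) = none := rfl
      simp only [List.map_nil, PySem.List.maxD, PySem.List.max?_id_cons, Option.getD_some,
        List.foldl_nil, hnone, Option.getD_none]
      omega
    | cons v vs =>
      simp only [List.map_cons, PySem.List.maxD, PySem.List.max?_id_cons, Option.getD_some,
        List.foldl_cons, add_zero]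
      rw [foldl_max_max, foldl_max_map_add_one]
      exact max_comm _ _

-- final assembly
theorem main_eq (s : String) : secondsToRemoveOccurrences s = secondsToRemoveOccurrences_alt s := by
  unfold secondsToRemoveOccurrences secondsToRemoveOccurrences_alt
  rw [A_fold, B_fold]
  simp only [List.nil_append]
  have hpos : ∀ e ∈ (eligL 0 s.toList).reverse, 1 ≤ e := by
    intro e he
    exact eligL_pos s.toList 0 le_rfl e (List.mem_reverse.mp he)
  have := maxRev (eligL 0 s.toList).reverse hpos
  rw [← this]
  rw [show eligL 0 s.toList = (eligL 0 s.toList).reverse.reverse by simp]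
  rw [List.foldl_reverse]
  simp

-- ===== VERDICT (by name: the statement is the Claim_ definition above) =====
theorem secondsToRemoveOccurrences_spec : Claim_equal_secondsToRemoveOccurrences := by
  intro s _
  unfold Spec_secondsToRemoveOccurrences
  exact main_eq s
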